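-- pv_equiv track=rewrite | github.com/odys-z/hello | docs/_downloads/passport_int.py | passort
-- ===== SOURCE A (Python) =====
-- def passort(pn: str) -> int:
-- 	ordered = sorted(pn)
-- 	pn = list(pn)
--
-- 	lo, hi = 0, len(pn) - 1
-- 	c = 0
-- 	while lo < hi:
-- 		while pn[lo] == ordered[lo]:
-- 			lo += 1
-- 			if lo >= hi: return c
-- 		lox = pn.index(ordered[lo], lo)
-- 		pn[lox], pn[lo] = pn[lo], pn[lox]
-- 		c += 1
-- 		lo += 1
--
-- 		while pn[hi] == ordered[hi]:
-- 			hi -= 1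
-- 			if lo >= hi: return c
-- 		hix = hi - 1
-- 		while pn[hix] != ordered[hi]:
-- 			hix -= 1
-- 		pn[hix], pn[hi] = pn[hi], pn[hix]
-- 		c += 1
-- 		hi -= 1
-- 	return c
-- ===== SOURCE B (Python) =====
-- # B: pure recursion on a shrinking segment (no index arithmetic over the full
-- # array); left fix places the displaced head by first-occurrence index, right
-- # fix by last-occurrence found through a reversed scan of the segment.
-- def passort(pn: str) -> int:
--     return _go(list(pn), sorted(pn))
--
--
-- def _go(seg, osg):
--     if len(seg) < 2:
--         return 0
--     if seg[0] == osg[0]: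
--         return _go(seg[1:], osg[1:])
--     rest = seg[1:]
--     rest[seg.index(osg[0]) - 1] = seg[0]
--     return 1 + _goR(rest, osg[1:])
--
--
-- def _goR(seg, osg):
--     if seg[-1] == osg[-1]:
--         if len(seg) <= 2:
--             return 0
--         return _goR(seg[:-1], osg[:-1])
--     rest = seg[:-1]
--     k = len(rest) - 1 - rest[::-1].index(osg[-1])
--     rest[k] = seg[-1]
--     return 1 + _go(rest, osg[:-1])
-- ===== Notes on version B (the rewrite author's own statement) =====
-- stated objective: alternative
-- what changed: Replaces the in-place two-index while loops over the full array with pure structural recursion on the shrinking unsorted segment, peeling settled ends off explicit slices and rebuilding the segment after each placement.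
import Mathlib
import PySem

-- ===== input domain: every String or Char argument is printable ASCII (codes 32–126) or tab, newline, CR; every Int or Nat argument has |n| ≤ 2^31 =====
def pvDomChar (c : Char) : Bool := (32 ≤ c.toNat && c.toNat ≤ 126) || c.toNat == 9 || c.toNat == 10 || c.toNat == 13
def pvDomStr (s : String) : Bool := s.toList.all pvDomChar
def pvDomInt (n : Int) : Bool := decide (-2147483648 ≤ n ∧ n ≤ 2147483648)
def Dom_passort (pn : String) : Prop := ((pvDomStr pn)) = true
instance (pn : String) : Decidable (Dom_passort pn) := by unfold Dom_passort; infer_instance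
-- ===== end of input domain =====

-- B recomputes A's two-ended greedy by pure recursion on the shrinking segment; return value only (A mutates its local list).

-- ===== PORT A =====
-- A's inner downward scan `while pn[hix] != t: hix -= 1` (hand port, exact on every
-- reachable state; for hix < 0 Python would wrap/raise — unreachable for every input).
def passortScanDown (pn : List Char) (t : Char) (hix : Int) : Int :=
  if h : 0 ≤ hix then
    if PySem.List.pyGetD pn hix ' ' = t then hix
    else passortScanDown pn t (hix - 1)
  else hix
termination_by (hix + 1).toNat
decreasing_by omega

-- the four program points of A's while nest, one recursive function each
-- (`while lo < hi` loop-back edges are the guarded calls back to passortSkipLo);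
-- list reads/writes via pyGetD/pySetD (in range on every reachable state);
-- `pn.index(ordered[lo], lo)` is ported by hand as index? on the suffix
-- (exact: first index ≥ lo; the none branch is Python's ValueError, unreachable).
mutual
def passortSkipLo (pn ordered : List Char) (lo hi c : Int) : Int :=
  if PySem.List.pyGetD pn lo ' ' = PySem.List.pyGetD ordered lo ' ' then
    if lo + 1 ≥ hi then c else passortSkipLo pn ordered (lo + 1) hi c
  else passortFixLo pn ordered lo hi c
termination_by ((hi - lo).toNat, 3)
decreasing_by all_goals (simp [Prod.lex_def]; try omega)

def passortFixLo (pn ordered : List Char) (lo hi c : Int) : Int :=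
  let lox : Int := lo + ((PySem.List.index? (pn.drop lo.toNat) (PySem.List.pyGetD ordered lo ' ')).getD 0 : Nat)
    -- `.getD 0` stands for Python's ValueError on a failed index(); unreachable
  let pn' := PySem.List.pySetD (PySem.List.pySetD pn lox (PySem.List.pyGetD pn lo ' ')) lo (PySem.List.pyGetD pn lox ' ')
  passortSkipHi pn' ordered (lo + 1) hi (c + 1)
termination_by ((hi - lo).toNat, 2)
decreasing_by all_goals (simp [Prod.lex_def]; try omega)

def passortSkipHi (pn ordered : List Char) (lo hi c : Int) : Int :=
  if PySem.List.pyGetD pn hi ' ' = PySem.List.pyGetD ordered hi ' ' then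
    if lo ≥ hi - 1 then c else passortSkipHi pn ordered lo (hi - 1) c
  else passortFixHi pn ordered lo hi c
termination_by ((hi - lo).toNat, 1)
decreasing_by all_goals (simp [Prod.lex_def]; try omega)

def passortFixHi (pn ordered : List Char) (lo hi c : Int) : Int :=
  let hix := passortScanDown pn (PySem.List.pyGetD ordered hi ' ') (hi - 1)
  let pn' := PySem.List.pySetD (PySem.List.pySetD pn hix (PySem.List.pyGetD pn hi ' ')) hi (PySem.List.pyGetD pn hix ' ')
  if lo < hi - 1 then passortSkipLo pn' ordered lo (hi - 1) (c + 1) else c + 1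
termination_by ((hi - lo).toNat, 0)
decreasing_by all_goals (simp [Prod.lex_def]; try omega)
end

def passort (pn : String) : Int :=
  let ordered := PySem.List.sorted pn.toList (fun x => x) false
  let l := pn.toList
  let lo : Int := 0
  let hi : Int := (l.length : Int) - 1
  let c : Int := 0
  if lo < hi then passortSkipLo l ordered lo hi c else c

-- ===== PORT B =====
-- transliteration of Source B: _go / _goR recurse on slices of the segment;
-- seg.index / rest[::-1].index via index? (none = Python ValueError, unreachable);
-- the single element assignment via pySetD.
mutual
def passortGo (seg osg : List Char) : Int :=
  if seg.length < 2 then 0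
  else if PySem.List.pyGetD seg 0 ' ' = PySem.List.pyGetD osg 0 ' ' then
    passortGo (PySem.List.slice seg (some 1) none) (PySem.List.slice osg (some 1) none)
  else
    let j : Int := ((PySem.List.index? seg (PySem.List.pyGetD osg 0 ' ')).getD 0 : Nat)
    -- `.getD 0` stands for Python's ValueError on a failed index(); unreachable
    let rest := PySem.List.pySetD (PySem.List.slice seg (some 1) none) (j - 1) (PySem.List.pyGetD seg 0 ' ')
    1 + passortGoR rest (PySem.List.slice osg (some 1) none)
termination_by (seg.length, 0)
decreasing_by all_goals (simp [Prod.lex_def, PySem.List.slice_from_one, PySem.List.length_pySetD, List.length_tail]; try omega)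

def passortGoR (seg osg : List Char) : Int :=
  if PySem.List.pyGetD seg (-1) ' ' = PySem.List.pyGetD osg (-1) ' ' then
    if seg.length ≤ 2 then 0
    else passortGoR (PySem.List.slice seg none (some (-1))) (PySem.List.slice osg none (some (-1)))
  else
    let rest := PySem.List.slice seg none (some (-1))
    let k : Int := (rest.length : Int) - 1 - ((PySem.List.index? rest.reverse (PySem.List.pyGetD osg (-1) ' ')).getD 0 : Nat)
    -- `.getD 0` stands for Python's ValueError on a failed index(); unreachable
    let rest' := PySem.List.pySetD rest k (PySem.List.pyGetD seg (-1) ' ')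
    1 + passortGo rest' (PySem.List.slice osg none (some (-1)))
termination_by (seg.length, 1)
decreasing_by all_goals (simp [Prod.lex_def, PySem.List.slice_to_neg_one, PySem.List.length_pySetD, List.length_dropLast]; try omega)
end

def passort_alt (pn : String) : Int :=
  passortGo pn.toList (PySem.List.sorted pn.toList (fun x => x) false)

-- ===== PRECONDITION & SPEC =====
def Spec_passort (pn : String) (out : Int) : Prop := out = passort_alt pn
instance (pn : String) (out : Int) : Decidable (Spec_passort pn out) := by unfold Spec_passort; infer_instance

-- ===== CLAIM (what is proved, stated in full; the proofs are below) =====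
def Claim_equal_passort : Prop := ∀ (pn : String), Dom_passort pn → Spec_passort pn (passort pn)


-- ===== LEMMAS AND PROOFS =====

-- pn[lo..hi] (inclusive): the still-unsorted window of A, as a list
def pvSeg (pn : List Char) (lo hi : Int) : List Char :=
  (pn.drop lo.toNat).take ((hi + 1 - lo).toNat)

lemma pvSeg_length (pn : List Char) {lo hi : Int} (h0 : 0 ≤ lo) (h1 : hi < (pn.length : Int)) :
    (pvSeg pn lo hi).length = (hi + 1 - lo).toNat := by
  simp only [pvSeg, List.length_take, List.length_drop]
  omega

lemma pvSeg_nil (pn : List Char) {lo hi : Int} (h : hi < lo) : pvSeg pn lo hi = [] := by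
  unfold pvSeg
  rw [(by omega : (hi + 1 - lo).toNat = 0)]
  rfl

lemma pvSeg_cons {pn : List Char} {lo hi : Int} (h0 : 0 ≤ lo) (h2 : lo ≤ hi)
    (h1 : hi < (pn.length : Int)) (hl : lo.toNat < pn.length) :
    pvSeg pn lo hi = pn[lo.toNat] :: pvSeg pn (lo + 1) hi := by
  unfold pvSeg
  rw [List.drop_eq_getElem_cons hl]
  rw [(by omega : (hi + 1 - lo).toNat = (hi + 1 - (lo + 1)).toNat + 1), List.take_succ_cons]
  rw [(by omega : (lo + 1).toNat = lo.toNat + 1)]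

lemma pvSeg_snoc {pn : List Char} {lo hi : Int} (h0 : 0 ≤ lo) (h2 : lo ≤ hi)
    (h1 : hi < (pn.length : Int)) (hl : hi.toNat < pn.length) :
    pvSeg pn lo hi = pvSeg pn lo (hi - 1) ++ [pn[hi.toNat]] := by
  unfold pvSeg
  rw [(by omega : (hi + 1 - lo).toNat = (hi - 1 + 1 - lo).toNat + 1), List.take_add_one]
  congr 1
  rw [List.getElem?_drop]
  rw [(by omega : lo.toNat + (hi - 1 + 1 - lo).toNat = hi.toNat)]
  rw [List.getElem?_eq_getElem hl]
  rfl

lemma pvSeg_getElem {pn : List Char} {lo hi : Int} {k : Nat}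
    (hk : k < (pvSeg pn lo hi).length) (hl : lo.toNat + k < pn.length) :
    (pvSeg pn lo hi)[k] = pn[lo.toNat + k] := by
  simp only [pvSeg, List.getElem_take, List.getElem_drop]

lemma pvSeg_getElem? {pn : List Char} {lo hi : Int} (h0 : 0 ≤ lo) {k : Nat}
    (hk : k < (hi + 1 - lo).toNat) (hhi : hi < (pn.length : Int)) :
    (pvSeg pn lo hi)[k]? = pn[lo.toNat + k]? := by
  have h1 : k < (pvSeg pn lo hi).length := by rw [pvSeg_length pn h0 hhi]; omega
  have h2 : lo.toNat + k < pn.length := by omega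
  rw [List.getElem?_eq_getElem h1, List.getElem?_eq_getElem h2, pvSeg_getElem h1 h2]

lemma pvSeg_set_lt {pn : List Char} {lo hi : Int} {j : Nat} {v : Char} (hj : (j : Int) < lo) :
    pvSeg (pn.set j v) lo hi = pvSeg pn lo hi := by
  apply List.ext_getElem
  · simp [pvSeg]
  · intro i h1 h2
    simp only [pvSeg, List.getElem_take, List.getElem_drop, List.getElem_set]
    rw [if_neg (by omega)]

lemma pvSeg_set_gt {pn : List Char} {lo hi : Int} {j : Nat} {v : Char} (h0 : 0 ≤ lo)
    (hj : hi < (j : Int)) :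
    pvSeg (pn.set j v) lo hi = pvSeg pn lo hi := by
  apply List.ext_getElem
  · simp [pvSeg]
  · intro i h1 h2
    simp only [pvSeg, List.length_take, List.length_drop, List.length_set] at h1
    simp only [pvSeg, List.getElem_take, List.getElem_drop, List.getElem_set]
    rw [if_neg (by omega)]

lemma pvSeg_set_mem {pn : List Char} {lo hi : Int} {k : Nat} {v : Char} (h0 : 0 ≤ lo)
    (hk : lo + (k : Int) ≤ hi) (hhi : hi < (pn.length : Int)) :
    pvSeg (pn.set (lo.toNat + k) v) lo hi = (pvSeg pn lo hi).set k v := by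
  apply List.ext_getElem
  · simp [pvSeg]
  · intro i h1 h2
    simp only [pvSeg, List.getElem_take, List.getElem_drop, List.getElem_set]
    by_cases h : k = i
    · rw [if_pos (by omega), if_pos h]
    · rw [if_neg (by omega), if_neg h]

-- a first occurrence inside a prefix is the first occurrence of the whole list
lemma pvIndex?_take_of_mem {xs : List Char} {m : Nat} {t : Char} (h : t ∈ xs.take m) :
    PySem.List.index? xs t = PySem.List.index? (xs.take m) t := by
  induction xs generalizing m with
  | nil => simp at h
  | cons x xs ih =>
    cases m with
    | zero => simp at h
    | succ m =>
      simp only [List.take_succ_cons] at h ⊢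
      by_cases hx : x = t
      · subst hx
        rw [PySem.List.index?_cons_self, PySem.List.index?_cons_self]
      · have h' : t ∈ xs.take m := by
          rcases List.mem_cons.mp h with h | h
          · exact absurd h.symm hx
          · exact h
        rw [PySem.List.index?_cons_of_ne xs hx, PySem.List.index?_cons_of_ne (xs.take m) hx, ih h']

-- A's downward scan lands exactly on j when pn[j] = t and no t lies in (j, hix]
lemma pvScanDown_spec (pn : List Char) (t : Char) :
    ∀ (n : Nat) (hix : Int) (j : Nat), (hix - j).toNat = n →
      (j : Int) ≤ hix → hix < (pn.length : Int) →
      pn[j]? = some t →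
      (∀ (i : Nat), j < i → (i : Int) ≤ hix → pn[i]? ≠ some t) →
      passortScanDown pn t hix = (j : Int) := by
  intro n
  induction n with
  | zero =>
    intro hix j hn hle hlt hjt _
    have hx : hix = (j : Int) := by omega
    subst hx
    have hj : j < pn.length := by
      by_contra hc
      rw [List.getElem?_eq_none (by omega)] at hjt
      simp at hjt
    rw [passortScanDown, dif_pos (by omega : (0:Int) ≤ (j : Int))]
    rw [PySem.List.pyGetD_eq_getElem pn ' ' (by omega) (by exact_mod_cast hlt)]
    have hv : pn[j] = t := by
      rw [List.getElem?_eq_getElem hj] at hjt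
      exact Option.some.inj hjt
    rw [if_pos (by simpa using hv)]
  | succ n ih =>
    intro hix j hn hle hlt hjt hno
    have hgt : (j : Int) < hix := by omega
    have hhx : hix.toNat < pn.length := by omega
    rw [passortScanDown, dif_pos (by omega : (0:Int) ≤ hix)]
    rw [PySem.List.pyGetD_eq_getElem pn ' ' (by omega) hlt]
    have hne : pn[hix.toNat] ≠ t := by
      intro hc
      exact hno hix.toNat (by omega) (by omega) (by rw [List.getElem?_eq_getElem hhx, hc])
    rw [if_neg hne]
    exact ih (hix - 1) j (by omega) (by omega) (by omega) hjt
      (fun i h1 h2 => hno i h1 (by omega))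

-- the main bridge: A's loop nest equals B's segment recursion, by simultaneous
-- strong induction on a bound for the window size
lemma pvBridge : ∀ n : Nat,
    (∀ (pn ordered : List Char) (lo hi c : Int),
      0 ≤ lo → lo < hi → hi < (pn.length : Int) → ordered.length = pn.length →
      (pvSeg pn lo hi).Perm (pvSeg ordered lo hi) → (hi - lo).toNat ≤ n →
      passortSkipLo pn ordered lo hi c = c + passortGo (pvSeg pn lo hi) (pvSeg ordered lo hi))
    ∧
    (∀ (pn ordered : List Char) (lo hi c : Int),
      0 ≤ lo → lo ≤ hi → hi < (pn.length : Int) → ordered.length = pn.length →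
      (pvSeg pn lo hi).Perm (pvSeg ordered lo hi) → (hi - lo).toNat ≤ n →
      passortSkipHi pn ordered lo hi c = c + passortGoR (pvSeg pn lo hi) (pvSeg ordered lo hi)) := by
  intro n
  induction n using Nat.strong_induction_on with
  | _ n ih =>
  constructor
  · -- skipLo ↔ go
    intro pn ordered lo hi c h0 hlt hhi hlen hperm hn
    have hl : lo.toNat < pn.length := by omega
    have hlo : lo.toNat < ordered.length := by omega
    have hseg := pvSeg_cons h0 (le_of_lt hlt) hhi hl
    have hoseg := pvSeg_cons h0 (le_of_lt hlt) (by omega : hi < (ordered.length : Int)) hlo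
    have hga := PySem.List.pyGetD_eq_getElem pn ' ' h0 (by omega : lo < (pn.length : Int))
    have hgo := PySem.List.pyGetD_eq_getElem ordered ' ' h0 (by omega : lo < (ordered.length : Int))
    have hlenseg : (pvSeg pn lo hi).length = (hi + 1 - lo).toNat := pvSeg_length pn h0 hhi
    have hsg0 : PySem.List.pyGetD (pvSeg pn lo hi) 0 ' ' = pn[lo.toNat] := by
      rw [hseg]; exact PySem.List.pyGetD_zero_cons _ _ _
    have hog0 : PySem.List.pyGetD (pvSeg ordered lo hi) 0 ' ' = ordered[lo.toNat] := by
      rw [hoseg]; exact PySem.List.pyGetD_zero_cons _ _ _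
    rw [passortSkipLo, passortGo, hga, hgo, if_neg (by omega : ¬ (pvSeg pn lo hi).length < 2),
        hsg0, hog0]
    by_cases heq : pn[lo.toNat] = ordered[lo.toNat]
    · -- heads already agree: skip
      rw [if_pos heq, if_pos heq]
      rw [PySem.List.slice_from_one, PySem.List.slice_from_one, hseg, hoseg,
          List.tail_cons, List.tail_cons]
      have hperm' : (pvSeg pn (lo + 1) hi).Perm (pvSeg ordered (lo + 1) hi) := by
        have h := hperm
        rw [hseg, hoseg] at h
        rw [heq] at h
        exact h.cons_inv
      by_cases hend : lo + 1 ≥ hi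
      · rw [if_pos hend]
        have hlen1 : (pvSeg pn (lo + 1) hi).length < 2 := by
          rw [pvSeg_length pn (by omega) hhi]; omega
        rw [passortGo, if_pos hlen1]
        omega
      · rw [if_neg hend]
        exact (ih (n - 1) (by omega)).1 pn ordered (lo + 1) hi c (by omega) (by omega)
          hhi hlen hperm' (by omega)
    · -- left fix
      rw [if_neg heq, if_neg heq, passortFixLo, hga, hgo]
      have htmem : ordered[lo.toNat] ∈ pvSeg pn lo hi := by
        apply hperm.mem_iff.mpr
        rw [hoseg]; exact List.mem_cons_self
      have hidx : PySem.List.index? (pn.drop lo.toNat) ordered[lo.toNat]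
          = PySem.List.index? (pvSeg pn lo hi) ordered[lo.toNat] :=
        pvIndex?_take_of_mem htmem
      obtain ⟨k, hk⟩ : ∃ k, PySem.List.index? (pvSeg pn lo hi) ordered[lo.toNat] = some k :=
        Option.isSome_iff_exists.mp
          ((PySem.List.index?_isSome_iff (pvSeg pn lo hi) ordered[lo.toNat]).mpr htmem)
      obtain ⟨hklt, hgetk, _⟩ := PySem.List.getElem_of_index?_eq_some hk
      obtain ⟨pre, suf, hdec, hprelen, _⟩ := (PySem.List.index?_eq_some_iff _ _ _).mp hk
      have hk1 : 1 ≤ k := by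
        by_contra hc
        apply heq
        have hk0 : k = 0 := by omega
        subst hk0
        have h00 : (pvSeg pn lo hi)[0] = pn[lo.toNat] := by
          rw [pvSeg_getElem hklt (by omega)]
          simp
        rw [← h00, hgetk]
      have hkhi : lo + (k : Int) ≤ hi := by omega
      have hgl : PySem.List.pyGetD pn (lo + (k : Int)) ' ' = ordered[lo.toNat] := by
        rw [PySem.List.pyGetD_eq_getElem pn ' ' (by omega) (by omega : lo + (k : Int) < (pn.length : Int))]
        have h2 : lo.toNat + k < pn.length := by omega
        have h1 : pn[(lo + (k : Int)).toNat]? = pn[lo.toNat + k]? := by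
          rw [(by omega : (lo + (k : Int)).toNat = lo.toNat + k)]
        rw [List.getElem?_eq_getElem (by omega), List.getElem?_eq_getElem h2] at h1
        rw [Option.some.inj h1, ← pvSeg_getElem hklt h2]
        exact hgetk
      rw [hidx, hk]
      simp only [Option.getD_some]
      rw [hgl, PySem.List.pySetD_of_nonneg _ _ (by omega : (0:Int) ≤ lo + (k : Int)),
          PySem.List.pySetD_of_nonneg _ _ h0,
          PySem.List.pySetD_of_nonneg _ _ (by omega : (0:Int) ≤ (k : Int) - 1),
          PySem.List.slice_from_one, hseg, List.tail_cons,
          PySem.List.slice_from_one, hoseg, List.tail_cons]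
      rw [(by omega : (lo + (k : Int)).toNat = lo.toNat + k),
          (by omega : ((k : Int) - 1).toNat = k - 1)]
      -- the window of the modified list is the modified window
      have e1 : pvSeg ((pn.set (lo.toNat + k) pn[lo.toNat]).set lo.toNat ordered[lo.toNat]) (lo + 1) hi
          = pvSeg (pn.set (lo.toNat + k) pn[lo.toNat]) (lo + 1) hi :=
        pvSeg_set_lt (by omega : ((lo.toNat : Int)) < lo + 1)
      have e2 : pvSeg (pn.set (lo.toNat + k) pn[lo.toNat]) (lo + 1) hi
          = (pvSeg pn (lo + 1) hi).set (k - 1) pn[lo.toNat] := by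
        rw [(by omega : lo.toNat + k = (lo + 1).toNat + (k - 1))]
        exact pvSeg_set_mem (by omega) (by omega) (by omega)
      -- the decomposition of the window at the first occurrence of the target
      obtain ⟨u, htail, hu⟩ : ∃ u, pvSeg pn (lo + 1) hi = u ++ ordered[lo.toNat] :: suf ∧
          u.length = k - 1 := by
        cases pre with
        | nil => exact absurd hprelen (by simp; omega)
        | cons p0 u =>
          refine ⟨u, ?_, by simp at hprelen; omega⟩
          have h := hseg.symm.trans hdec
          rw [List.cons_append] at h
          exact (List.cons.injEq _ _ _ _ ▸ h).2
      have hset : (pvSeg pn (lo + 1) hi).set (k - 1) pn[lo.toNat]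
          = u ++ pn[lo.toNat] :: suf := by
        rw [htail, ← hu]
        simp
      -- permutation invariant for the next window
      have hperm' : ((pvSeg pn (lo + 1) hi).set (k - 1) pn[lo.toNat]).Perm
          (pvSeg ordered (lo + 1) hi) := by
        have hB : (pvSeg pn lo hi).Perm (ordered[lo.toNat] :: pn[lo.toNat] :: (u ++ suf)) := by
          rw [hseg, htail]
          exact (List.perm_middle.cons _).trans (List.Perm.swap _ _ _)
        have hC := (hB.symm.trans hperm)
        rw [hoseg] at hC
        have hD := hC.cons_inv
        rw [hset]
        exact List.perm_middle.trans hD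
      have hIH := (ih (n - 1) (by omega)).2
        ((pn.set (lo.toNat + k) pn[lo.toNat]).set lo.toNat ordered[lo.toNat]) ordered
        (lo + 1) hi (c + 1) (by omega) (by omega)
        (by simp only [List.length_set]; omega)
        (by simp only [List.length_set]; omega)
        (by rw [e1, e2]; exact hperm') (by omega)
      rw [hIH, e1, e2]
      ring
  · -- skipHi ↔ goR
    intro pn ordered lo hi c h0 hle hhi hlen hperm hn
    have h0hi : 0 ≤ hi := by omega
    have hl : hi.toNat < pn.length := by omega
    have hlo : hi.toNat < ordered.length := by omega
    have hsnoc := pvSeg_snoc h0 hle hhi hl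
    have hosnoc := pvSeg_snoc h0 hle (by omega : hi < (ordered.length : Int)) hlo
    have hga := PySem.List.pyGetD_eq_getElem pn ' ' h0hi (by omega : hi < (pn.length : Int))
    have hgo := PySem.List.pyGetD_eq_getElem ordered ' ' h0hi (by omega : hi < (ordered.length : Int))
    have hlenseg : (pvSeg pn lo hi).length = (hi + 1 - lo).toNat := pvSeg_length pn h0 hhi
    have hsg1 : PySem.List.pyGetD (pvSeg pn lo hi) (-1) ' ' = pn[hi.toNat] := by
      rw [hsnoc]; exact PySem.List.pyGetD_neg_one_append_singleton _ _ _
    have hog1 : PySem.List.pyGetD (pvSeg ordered lo hi) (-1) ' ' = ordered[hi.toNat] := by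
      rw [hosnoc]; exact PySem.List.pyGetD_neg_one_append_singleton _ _ _
    rw [passortSkipHi, passortGoR, hga, hgo, hsg1, hog1]
    by_cases heq : pn[hi.toNat] = ordered[hi.toNat]
    · -- tails already agree: skip
      rw [if_pos heq, if_pos heq]
      have hd1 : (pvSeg pn lo hi).dropLast = pvSeg pn lo (hi - 1) := by
        rw [hsnoc]; exact List.dropLast_concat
      have hd2 : (pvSeg ordered lo hi).dropLast = pvSeg ordered lo (hi - 1) := by
        rw [hosnoc]; exact List.dropLast_concat
      by_cases hend : lo ≥ hi - 1
      · rw [if_pos hend, if_pos (by omega : (pvSeg pn lo hi).length ≤ 2)]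
        omega
      · rw [if_neg hend, if_neg (by omega : ¬ (pvSeg pn lo hi).length ≤ 2)]
        rw [PySem.List.slice_to_neg_one, PySem.List.slice_to_neg_one, hd1, hd2]
        have hperm' : (pvSeg pn lo (hi - 1)).Perm (pvSeg ordered lo (hi - 1)) := by
          have h := hperm
          rw [hsnoc, hosnoc, heq] at h
          exact (List.perm_append_right_iff _).mp h
        exact (ih (n - 1) (by omega)).2 pn ordered lo (hi - 1) c h0 (by omega) (by omega)
          hlen hperm' (by omega)
    · -- right fix
      have hlohi : lo < hi := by
        rcases lt_or_ge lo hi with h | h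
        · exact h
        · exfalso
          apply heq
          have hx : lo = hi := by omega
          have h := hperm
          rw [hsnoc, hosnoc, hx, pvSeg_nil pn (by omega), pvSeg_nil ordered (by omega)] at h
          simpa using h
      rw [if_neg heq, if_neg heq, passortFixHi, hga, hgo]
      rw [PySem.List.slice_to_neg_one]
      have hd1 : (pvSeg pn lo hi).dropLast = pvSeg pn lo (hi - 1) := by
        rw [hsnoc]; exact List.dropLast_concat
      have hd2 : (pvSeg ordered lo hi).dropLast = pvSeg ordered lo (hi - 1) := by
        rw [hosnoc]; exact List.dropLast_concat
      rw [hd1]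
      have hLlen : (pvSeg pn lo (hi - 1)).length = (hi - lo).toNat :=
        (pvSeg_length pn h0 (by omega)).trans (by omega)
      -- the target occurs in the remaining prefix
      have holmem : ordered[hi.toNat] ∈ pvSeg pn lo (hi - 1) := by
        have h1 : ordered[hi.toNat] ∈ pvSeg pn lo hi := by
          apply hperm.mem_iff.mpr
          rw [hosnoc]; exact List.mem_append_right _ (by simp)
        rw [hsnoc] at h1
        rcases List.mem_append.mp h1 with h | h
        · exact h
        · simp at h
          exact absurd h.symm heq
      obtain ⟨k2, hk2⟩ : ∃ k2, PySem.List.index? (pvSeg pn lo (hi - 1)).reverse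
          ordered[hi.toNat] = some k2 :=
        Option.isSome_iff_exists.mp
          ((PySem.List.index?_isSome_iff _ _).mpr (List.mem_reverse.mpr holmem))
      obtain ⟨hk2lt, hget2, hfirst2⟩ := PySem.List.getElem_of_index?_eq_some hk2
      obtain ⟨pre2, suf2, hdec2, hpre2len, hnotpre2⟩ := (PySem.List.index?_eq_some_iff _ _ _).mp hk2
      have hk2L : k2 < (hi - lo).toNat := by
        have := hk2lt
        simp only [List.length_reverse, hLlen] at this
        exact this
      have hrev : pvSeg pn lo (hi - 1) = suf2.reverse ++ ordered[hi.toNat] :: pre2.reverse := by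
        have h := congrArg List.reverse hdec2
        simpa [List.reverse_append] using h
      have hLr : (pvSeg pn lo (hi - 1)).reverse.length = (hi - lo).toNat := by
        rw [List.length_reverse, hLlen]
      have hulen : suf2.reverse.length = (hi - lo).toNat - 1 - k2 := by
        have h := congrArg List.length hrev
        simp only [List.length_append, List.length_cons, List.length_reverse, hLlen] at h
        rw [List.length_reverse]
        omega
      -- the scan finds the last occurrence
      have hjq : pn[lo.toNat + ((hi - lo).toNat - 1 - k2)]? = some ordered[hi.toNat] := by
        rw [← pvSeg_getElem? h0 (by omega : (hi - lo).toNat - 1 - k2 < (hi - 1 + 1 - lo).toNat) (by omega)]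
        rw [List.getElem?_eq_getElem (by omega : (hi - lo).toNat - 1 - k2 < (pvSeg pn lo (hi - 1)).length)]
        congr 1
        rw [← hget2, List.getElem_reverse]
        congr 1
        omega
      have hscan : passortScanDown pn ordered[hi.toNat] (hi - 1)
          = ((lo.toNat + ((hi - lo).toNat - 1 - k2) : Nat) : Int) := by
        apply pvScanDown_spec pn _ ((hi - 1) - (lo.toNat + ((hi - lo).toNat - 1 - k2) : Nat)).toNat
          _ _ rfl (by omega) (by omega) hjq
        intro i h1 h2 hcontra
        have hi' : i - lo.toNat < (pvSeg pn lo (hi - 1)).length := by omega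
        have hgi : pn[i]? = (pvSeg pn lo (hi - 1))[i - lo.toNat]? := by
          rw [pvSeg_getElem? h0 (by omega) (by omega : hi - 1 < (pn.length : Int))]
          congr 1
          omega
        apply hfirst2 ((hi - lo).toNat - 1 - (i - lo.toNat)) (by omega)
        rw [List.getElem_reverse]
        have h2 : (pvSeg pn lo (hi - 1))[(pvSeg pn lo (hi - 1)).length - 1 -
            ((hi - lo).toNat - 1 - (i - lo.toNat))]? = some ordered[hi.toNat] := by
          rw [← hcontra, hgi]
          congr 1
          rw [hLlen]
          omega
        rw [List.getElem?_eq_getElem (by rw [hLlen]; omega)] at h2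
        exact Option.some.inj h2
      rw [hscan]
      have hpjlt : lo.toNat + ((hi - lo).toNat - 1 - k2) < pn.length := by omega
      have hgl : PySem.List.pyGetD pn ((lo.toNat + ((hi - lo).toNat - 1 - k2) : Nat) : Int) ' '
          = ordered[hi.toNat] := by
        rw [PySem.List.pyGetD_natCast, List.getD_eq_getElem?_getD, List.getElem?_eq_getElem hpjlt,
            Option.getD_some]
        rw [List.getElem?_eq_getElem hpjlt] at hjq
        exact Option.some.inj hjq
      rw [hgl, PySem.List.pySetD_of_nonneg _ _ (by omega : (0:Int) ≤ ((lo.toNat + ((hi - lo).toNat - 1 - k2) : Nat) : Int)),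
          PySem.List.pySetD_of_nonneg _ _ h0hi]
      simp only [hk2, Option.getD_some, Int.toNat_natCast]
      rw [PySem.List.pySetD_of_nonneg _ _ (by rw [hLlen]; omega : (0:Int) ≤ ((pvSeg pn lo (hi-1)).length : Int) - 1 - (k2 : Nat)),
          (by rw [hLlen]; omega : (((pvSeg pn lo (hi-1)).length : Int) - 1 - (k2 : Nat)).toNat = (hi - lo).toNat - 1 - k2)]
      -- windows of the modified list
      have e0 : pvSeg ((pn.set (lo.toNat + ((hi - lo).toNat - 1 - k2)) pn[hi.toNat]).set hi.toNat ordered[hi.toNat]) lo (hi - 1)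
          = pvSeg (pn.set (lo.toNat + ((hi - lo).toNat - 1 - k2)) pn[hi.toNat]) lo (hi - 1) :=
        pvSeg_set_gt h0 (by omega : hi - 1 < ((hi.toNat : Nat) : Int))
      have e2 : pvSeg (pn.set (lo.toNat + ((hi - lo).toNat - 1 - k2)) pn[hi.toNat]) lo (hi - 1)
          = (pvSeg pn lo (hi - 1)).set ((hi - lo).toNat - 1 - k2) pn[hi.toNat] :=
        pvSeg_set_mem h0 (by omega) (by omega)
      have hset : (pvSeg pn lo (hi - 1)).set ((hi - lo).toNat - 1 - k2) pn[hi.toNat]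
          = suf2.reverse ++ pn[hi.toNat] :: pre2.reverse := by
        rw [hrev, ← hulen]
        simp
      have hperm' : ((pvSeg pn lo (hi - 1)).set ((hi - lo).toNat - 1 - k2) pn[hi.toNat]).Perm
          (pvSeg ordered lo (hi - 1)) := by
        have hB : (pvSeg pn lo hi).Perm
            (ordered[hi.toNat] :: pn[hi.toNat] :: (suf2.reverse ++ pre2.reverse)) := by
          rw [hsnoc, hrev]
          exact ((List.perm_append_singleton _ _).trans (List.perm_middle.cons _)).trans
            (List.Perm.swap _ _ _)
        have hC := hB.symm.trans hperm
        rw [hosnoc] at hC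
        have hC' := hC.trans (List.perm_append_singleton _ _)
        have hD := hC'.cons_inv
        rw [hset]
        exact List.perm_middle.trans hD
      by_cases hend : lo < hi - 1
      · rw [if_pos hend]
        have hIH := (ih (n - 1) (by omega)).1
          ((pn.set (lo.toNat + ((hi - lo).toNat - 1 - k2)) pn[hi.toNat]).set hi.toNat ordered[hi.toNat])
          ordered lo (hi - 1) (c + 1) h0 hend
          (by simp only [List.length_set]; omega)
          (by simp only [List.length_set]; omega)
          (by rw [e0, e2]; exact hperm') (by omega)
        rw [hIH, e0, e2, PySem.List.slice_to_neg_one, hd2]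
        ring
      · rw [if_neg hend]
        have hlen1 : ((pvSeg pn lo (hi - 1)).set ((hi - lo).toNat - 1 - k2) pn[hi.toNat]).length < 2 := by
          rw [List.length_set, hLlen]; omega
        rw [passortGo, if_pos hlen1]
        ring

-- ===== VERDICT (by name: the statement is the Claim_ definition above) =====
theorem passort_spec : Claim_equal_passort := by
  unfold Claim_equal_passort Spec_passort
  intro pn _
  show passort pn = passort_alt pn
  unfold passort passort_alt
  have hlen : (PySem.List.sorted pn.toList (fun x => x) false).length = pn.toList.length :=
    (PySem.List.sorted_perm pn.toList (fun x => x) false).length_eq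
  by_cases h : (0 : Int) < (pn.toList.length : Int) - 1
  · rw [if_pos h]
    have hseg : pvSeg pn.toList 0 ((pn.toList.length : Int) - 1) = pn.toList := by
      unfold pvSeg
      rw [(by omega : ((0:Int)).toNat = 0), List.drop_zero,
          (by omega : ((pn.toList.length : Int) - 1 + 1 - 0).toNat = pn.toList.length),
          List.take_length]
    have hsegO : pvSeg (PySem.List.sorted pn.toList (fun x => x) false) 0
        ((pn.toList.length : Int) - 1) = PySem.List.sorted pn.toList (fun x => x) false := by
      unfold pvSeg
      rw [(by omega : ((0:Int)).toNat = 0), List.drop_zero,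
          (by rw [hlen]; omega : ((pn.toList.length : Int) - 1 + 1 - 0).toNat
            = (PySem.List.sorted pn.toList (fun x => x) false).length),
          List.take_length]
    have hb := (pvBridge ((pn.toList.length : Int) - 1 - 0).toNat).1 pn.toList
      (PySem.List.sorted pn.toList (fun x => x) false) 0 ((pn.toList.length : Int) - 1) 0
      le_rfl h (by omega) hlen
      (by rw [hseg, hsegO]; exact (PySem.List.sorted_perm pn.toList (fun x => x) false).symm)
      le_rfl
    rw [hb, hseg, hsegO]
    ring
  · rw [if_neg h]
    rw [passortGo, if_pos (by omega : (pn.toList.length) < 2)]
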